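-- pv_equiv track=rewrite | github.com/aman-mehra/Graph-traversal-algs | BnD.py | exclusive_min
-- ===== SOURCE A (Python) =====
-- def exclusive_min(d,Q):
--     temp_d=[]
--     temp_i=[]
--     for i in range(len(d)):
--         if i in Q:
--             temp_d.append(d[i])
--             temp_i.append(i)
--     m=min(temp_d)
--     indx=temp_d.index(m)
--     pos=temp_i[indx]
--     return (m,pos)
-- ===== SOURCE B (Python) =====
-- def exclusive_min(d, Q):
--     best = None
--     for i in range(len(d)):
--         if i in Q and (best is None or d[i] < best[0]):
--             best = (d[i], i)
--     if best is None:
--         raise ValueError("min() arg is an empty sequence")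
--     return best
-- ===== Notes on version B (the rewrite author's own statement) =====
-- stated objective: simpler
-- what changed: Single pass keeping a running (best_value, best_pos) pair with a strict comparison, instead of building two parallel lists and then running min/index/lookup over them.
import Mathlib
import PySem

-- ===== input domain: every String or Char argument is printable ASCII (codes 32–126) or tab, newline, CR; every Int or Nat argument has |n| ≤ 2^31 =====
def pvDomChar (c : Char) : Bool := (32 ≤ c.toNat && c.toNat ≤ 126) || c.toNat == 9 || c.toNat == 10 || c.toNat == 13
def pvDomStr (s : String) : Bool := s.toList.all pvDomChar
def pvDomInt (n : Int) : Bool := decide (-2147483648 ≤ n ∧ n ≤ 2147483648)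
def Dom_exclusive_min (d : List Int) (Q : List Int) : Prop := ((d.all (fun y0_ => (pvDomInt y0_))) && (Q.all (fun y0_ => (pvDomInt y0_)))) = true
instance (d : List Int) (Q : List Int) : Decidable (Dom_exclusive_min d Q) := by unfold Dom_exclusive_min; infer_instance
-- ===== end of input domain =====

-- B replaces A's two parallel lists + min/index/lookup passes by a single running-minimum pass (simpler decomposition).


-- ===== PORT A =====
def exclusive_min (d : List Int) (Q : List Int) : Int × Int :=
  let st := (List.range d.length).foldl
    (fun (acc : List Int × List Int) (i : Nat) =>
      if (i : Int) ∈ Q then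
        (acc.1 ++ [PySem.List.pyGetD d (i : Int) 0], acc.2 ++ [(i : Int)])
      else acc)
    ([], [])
  match PySem.List.min? st.1 (fun x => x) with
  | none => (0, 0)        -- Python: min([]) raises ValueError; excluded by Pre_
  | some m =>
    match PySem.List.index? st.1 m with
    | none => (0, 0)      -- unreachable: m ∈ st.1
    | some indx => (m, PySem.List.pyGetD st.2 (indx : Int) 0)

-- ===== PORT B =====
def exclusive_min_alt (d : List Int) (Q : List Int) : Int × Int :=
  let best := (List.range d.length).foldl
    (fun (best : Option (Int × Int)) (i : Nat) =>
      if (i : Int) ∈ Q then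
        match best with
        | none => some (PySem.List.pyGetD d (i : Int) 0, (i : Int))
        | some b =>
          if PySem.List.pyGetD d (i : Int) 0 < b.1 then
            some (PySem.List.pyGetD d (i : Int) 0, (i : Int))
          else best
      else best)
    none
  match best with
  | none => (0, 0)        -- Python: B raises ValueError here; excluded by Pre_
  | some b => b

-- ===== PRECONDITION & SPEC =====
-- Pre_: some index of d is selected by Q (otherwise both Pythons raise ValueError).
def Pre_exclusive_min (d : List Int) (Q : List Int) : Prop :=
  ∃ i : Nat, i < d.length ∧ (i : Int) ∈ Q
instance (d : List Int) (Q : List Int) : Decidable (Pre_exclusive_min d Q) := by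
  unfold Pre_exclusive_min; infer_instance
def pvWitness_exclusive_min : List Int × List Int := ([5, 3, 7], [1, 2])
def Spec_exclusive_min (d : List Int) (Q : List Int) (out : Int × Int) : Prop := out = exclusive_min_alt d Q
instance (d : List Int) (Q : List Int) (out : Int × Int) : Decidable (Spec_exclusive_min d Q out) := by unfold Spec_exclusive_min; infer_instance

-- ===== CLAIM (what is proved, stated in full; the proofs are below) =====
def Claim_equal_exclusive_min : Prop := ∀ (d : List Int) (Q : List Int), Dom_exclusive_min d Q → Pre_exclusive_min d Q → Spec_exclusive_min d Q (exclusive_min d Q)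

-- ===== LEMMAS AND PROOFS =====

-- Selected (value, index) pairs among the first n indices.
def pvSel (d Q : List Int) (n : Nat) : List (Int × Int) :=
  (List.range n).filterMap (fun (i : Nat) =>
    if (i : Int) ∈ Q then some (PySem.List.pyGetD d (i : Int) 0, (i : Int)) else none)

-- The running-minimum step on pairs, and its fold.
def pvStep (b : Option (Int × Int)) (q : Int × Int) : Option (Int × Int) :=
  match b with
  | none => some q
  | some b' => if q.1 < b'.1 then some q else some b'

def pvOptMin (l : List (Int × Int)) : Option (Int × Int) := l.foldl pvStep none

lemma pvSel_succ (d Q : List Int) (n : Nat) :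
    pvSel d Q (n + 1) = pvSel d Q n ++
      (if (n : Int) ∈ Q then [(PySem.List.pyGetD d (n : Int) 0, (n : Int))] else []) := by
  simp only [pvSel, List.range_succ, List.filterMap_append]
  split <;> rename_i h <;> simp [h]

-- A's loop state equals the projections of pvSel.
lemma pvA_state (d Q : List Int) (n : Nat) :
    (List.range n).foldl
      (fun (acc : List Int × List Int) (i : Nat) =>
        if (i : Int) ∈ Q then
          (acc.1 ++ [PySem.List.pyGetD d (i : Int) 0], acc.2 ++ [(i : Int)])
        else acc)
      ([], [])
    = ((pvSel d Q n).map Prod.fst, (pvSel d Q n).map Prod.snd) := by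
  induction n with
  | zero => simp [pvSel]
  | succ n ih =>
    rw [List.range_succ, List.foldl_append, ih, pvSel_succ]
    by_cases h : (n : Int) ∈ Q <;> simp [h]

-- B's loop state equals pvOptMin of pvSel.
lemma pvB_state (d Q : List Int) (n : Nat) :
    (List.range n).foldl
      (fun (best : Option (Int × Int)) (i : Nat) =>
        if (i : Int) ∈ Q then
          match best with
          | none => some (PySem.List.pyGetD d (i : Int) 0, (i : Int))
          | some b =>
            if PySem.List.pyGetD d (i : Int) 0 < b.1 then
              some (PySem.List.pyGetD d (i : Int) 0, (i : Int))
            else best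
        else best)
      none
    = pvOptMin (pvSel d Q n) := by
  induction n with
  | zero => simp [pvSel, pvOptMin]
  | succ n ih =>
    rw [List.range_succ, List.foldl_append, ih, pvSel_succ]
    simp only [pvOptMin, List.foldl_append, List.foldl_cons, List.foldl_nil]
    by_cases h : (n : Int) ∈ Q
    · simp only [h, if_true]
      cases hb : (pvSel d Q n).foldl pvStep none with
      | none => simp [pvStep]
      | some b => simp only [List.foldl_cons, List.foldl_nil, pvStep]
    · simp [h]

-- Folding pvStep from a some-state yields the leftmost strict minimum.
lemma pvFold_some (ps : List (Int × Int)) (b : Int × Int) :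
    ∃ c, ps.foldl pvStep (some b) = some c ∧ (c = b ∨ c ∈ ps) ∧ c.1 ≤ b.1 ∧
      ∀ y ∈ ps, c.1 ≤ y.1 := by
  induction ps generalizing b with
  | nil => exact ⟨b, rfl, Or.inl rfl, le_refl _, by simp⟩
  | cons q ps ih =>
    simp only [List.foldl_cons, pvStep]
    by_cases h : q.1 < b.1
    · rw [if_pos h]
      obtain ⟨c, hc, hmem, hle, hall⟩ := ih q
      refine ⟨c, hc, ?_, le_trans hle (le_of_lt h), ?_⟩
      · rcases hmem with rfl | hm
        · exact Or.inr (List.mem_cons_self)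
        · exact Or.inr (List.mem_cons_of_mem _ hm)
      · intro y hy
        rcases List.mem_cons.mp hy with rfl | hy'
        · exact hle
        · exact hall y hy'
    · rw [if_neg h]
      obtain ⟨c, hc, hmem, hle, hall⟩ := ih b
      refine ⟨c, hc, ?_, hle, ?_⟩
      · rcases hmem with rfl | hm
        · exact Or.inl rfl
        · exact Or.inr (List.mem_cons_of_mem _ hm)
      · intro y hy
        rcases List.mem_cons.mp hy with rfl | hy'
        · exact le_trans hle (not_lt.mp h)
        · exact hall y hy'

-- pvOptMin of a nonempty list is some, its first component is the minimum.
lemma pvOptMin_some (l : List (Int × Int)) (hl : l ≠ []) :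
    ∃ b, pvOptMin l = some b ∧ b ∈ l ∧ (∀ y ∈ l, b.1 ≤ y.1) := by
  cases l with
  | nil => exact absurd rfl hl
  | cons p ps =>
    obtain ⟨c, hc, hmem, hle, hall⟩ := pvFold_some ps p
    refine ⟨c, ?_, ?_, ?_⟩
    · simpa [pvOptMin, pvStep] using hc
    · rcases hmem with rfl | hm
      · exact List.mem_cons_self
      · exact List.mem_cons_of_mem _ hm
    · intro y hy
      rcases List.mem_cons.mp hy with rfl | hy'
      · exact hle
      · exact hall y hy'

-- A's extraction from the projections equals pvOptMin, for nonempty selections.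
lemma pvExtract (l : List (Int × Int)) (hl : l ≠ []) :
    (match PySem.List.min? (l.map Prod.fst) (fun x => x) with
     | none => ((0 : Int), (0 : Int))
     | some m =>
       match PySem.List.index? (l.map Prod.fst) m with
       | none => ((0 : Int), (0 : Int))
       | some indx => (m, PySem.List.pyGetD (l.map Prod.snd) (indx : Int) 0))
    = (pvOptMin l).getD (0, 0) := by
  revert hl
  induction l using List.reverseRecOn with
  | nil => intro hl; exact absurd rfl hl
  | append_singleton l' q ih =>
    intro _
    cases l' with
    | nil =>
      have h1 : ([] ++ [q]).map (Prod.fst (α := Int) (β := Int)) = [q.1] := rfl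
      rw [h1, PySem.List.min?_id_cons,
          show List.foldl min q.1 ([] : List Int) = q.1 from rfl]
      show (match PySem.List.index? [q.1] q.1 with
            | none => ((0 : Int), (0 : Int))
            | some indx => (q.1, PySem.List.pyGetD (([] ++ [q]).map Prod.snd) ((indx : Nat) : Int) 0))
          = (pvOptMin ([] ++ [q])).getD (0, 0)
      rw [PySem.List.index?_cons_self]
      simp [pvOptMin, pvStep]
    | cons p ps =>
      -- the nonempty prefix l' = p :: ps
      obtain ⟨b', hb', hbmem, hbmin⟩ := pvOptMin_some (p :: ps) (List.cons_ne_nil p ps)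
      -- the minimum value of the prefix
      have hmin' : PySem.List.min? ((p :: ps).map Prod.fst) (fun x => x)
          = some (List.foldl min p.1 (ps.map Prod.fst)) := by
        rw [List.map_cons, PySem.List.min?_id_cons]
      set M : Int := List.foldl min p.1 (ps.map Prod.fst) with hM
      have hMmem : M ∈ (p :: ps).map Prod.fst := PySem.List.min?_mem hmin'
      have hMle : ∀ y ∈ (p :: ps).map Prod.fst, M ≤ y := by
        intro y hy
        simpa using PySem.List.min?_isMin hmin' y hy
      have hbM : b'.1 = M := by
        obtain ⟨y, hy, hyM⟩ := List.mem_map.mp hMmem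
        exact le_antisymm (hyM ▸ hbmin y hy) (hMle b'.1 (List.mem_map_of_mem hbmem))
      -- min? over the appended list
      have h2 : PySem.List.min? (((p :: ps) ++ [q]).map Prod.fst) (fun x => x)
          = some (min M q.1) := by
        rw [List.map_append, List.map_cons, List.cons_append,
            PySem.List.min?_id_cons, List.map_singleton, List.foldl_append]
        rfl
      rw [h2]
      show (match PySem.List.index? (((p :: ps) ++ [q]).map Prod.fst) (min M q.1) with
            | none => ((0 : Int), (0 : Int))
            | some indx => (min M q.1,
                PySem.List.pyGetD (((p :: ps) ++ [q]).map Prod.snd) ((indx : Nat) : Int) 0))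
          = (pvOptMin ((p :: ps) ++ [q])).getD (0, 0)
      have hOpt : pvOptMin ((p :: ps) ++ [q]) = pvStep (some b') q := by
        rw [pvOptMin, List.foldl_append, ← pvOptMin, hb']
        rfl
      by_cases hq : q.1 < M
      · -- the new element is a strict improvement
        have hmin : min M q.1 = q.1 := min_eq_right (le_of_lt hq)
        have hnot : q.1 ∉ (p :: ps).map Prod.fst := fun hmem =>
          absurd hq (not_lt.mpr (hMle q.1 hmem))
        have h3 : PySem.List.index? (((p :: ps) ++ [q]).map Prod.fst) (min M q.1)
            = some ((p :: ps).map (Prod.fst (α := Int) (β := Int))).length := by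
          rw [hmin, List.map_append, List.map_singleton,
              PySem.List.index?_append_singleton_self _ _ hnot]
        rw [h3]
        show (min M q.1, PySem.List.pyGetD (((p :: ps) ++ [q]).map Prod.snd)
            (((((p :: ps).map (Prod.fst (α := Int) (β := Int))).length : Nat)) : Int) 0)
          = (pvOptMin ((p :: ps) ++ [q])).getD (0, 0)
        rw [hOpt, hmin]
        have h4 : PySem.List.pyGetD (((p :: ps) ++ [q]).map Prod.snd)
            ((((p :: ps).map (Prod.fst (α := Int) (β := Int))).length : Nat) : Int) 0 = q.2 := by
          rw [PySem.List.pyGetD_natCast, List.map_append, List.map_singleton]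
          simp [List.getD]
        rw [h4]
        simp only [pvStep, hbM, hq, if_pos]
        rfl
      · -- the previous best survives
        have hmin : min M q.1 = M := min_eq_left (not_lt.mp hq)
        obtain ⟨k, hk⟩ := Option.isSome_iff_exists.mp
          ((PySem.List.index?_isSome_iff _ _).mpr hMmem)
        have hklt : k < ((p :: ps).map (Prod.fst (α := Int) (β := Int))).length :=
          (PySem.List.getElem_of_index?_eq_some hk).1
        have h3 : PySem.List.index? (((p :: ps) ++ [q]).map Prod.fst) (min M q.1)
            = some k := by
          rw [hmin, List.map_append, PySem.List.index?_append_of_mem _ hMmem, hk]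
        rw [h3]
        show (min M q.1, PySem.List.pyGetD (((p :: ps) ++ [q]).map Prod.snd) ((k : Nat) : Int) 0)
          = (pvOptMin ((p :: ps) ++ [q])).getD (0, 0)
        have h4 : PySem.List.pyGetD (((p :: ps) ++ [q]).map Prod.snd) ((k : Nat) : Int) 0
            = PySem.List.pyGetD ((p :: ps).map Prod.snd) ((k : Nat) : Int) 0 := by
          rw [PySem.List.pyGetD_natCast, PySem.List.pyGetD_natCast, List.map_append]
          have : k < ((p :: ps).map (Prod.snd (α := Int) (β := Int))).length := by
            simpa using hklt
          simp only [List.getD]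
          rw [List.getElem?_append_left this]
        rw [h4, hmin, hOpt]
        have hprev := ih (List.cons_ne_nil p ps)
        rw [hmin'] at hprev
        have hprev' : (match PySem.List.index? ((p :: ps).map Prod.fst) M with
            | none => ((0 : Int), (0 : Int))
            | some indx => (M, PySem.List.pyGetD ((p :: ps).map Prod.snd) ((indx : Nat) : Int) 0))
            = (pvOptMin (p :: ps)).getD (0, 0) := hprev
        rw [hk, hb'] at hprev'
        have hstep : pvStep (some b') q = some b' := by
          simp only [pvStep]
          rw [if_neg (by rw [hbM]; exact hq)]
        rw [hstep]
        exact hprev'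

lemma pvSel_ne_nil (d Q : List Int) (h : Pre_exclusive_min d Q) :
    pvSel d Q d.length ≠ [] := by
  obtain ⟨i, hi, hiQ⟩ := h
  have : (PySem.List.pyGetD d (i : Int) 0, (i : Int)) ∈ pvSel d Q d.length := by
    simp only [pvSel, List.mem_filterMap]
    exact ⟨i, by simp [List.mem_range, hi, hiQ]⟩
  intro hnil; rw [hnil] at this; exact absurd this (List.not_mem_nil)

-- ===== VERDICT (by name: the statement is the Claim_ definition above) =====
theorem exclusive_min_spec : Claim_equal_exclusive_min := by
  intro d Q _ hpre
  unfold Spec_exclusive_min exclusive_min exclusive_min_alt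
  rw [pvA_state, pvB_state]
  have hne := pvSel_ne_nil d Q hpre
  have := pvExtract (pvSel d Q d.length) hne
  simp only at this ⊢
  rw [this]
  obtain ⟨b, hb, -, -⟩ := pvOptMin_some _ hne
  rw [hb]; rfl
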